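-- pv_equiv track=rewrite | github.com/Bobcatsoap/jy-server | cell/RoomType6PassiveFindCards.py | is_f_single
-- ===== SOURCE A (Python) =====
-- def is_f_single(cards):
--     # 带单飞机
--     if len(cards) < 8:
--         return False
--     if len(cards) % 4 != 0:
--         return False
--     new_cards = cards.copy()
--     three = []
--     # 找到所有的三张
--     for card in new_cards:
--         if new_cards.count(card) >= 3 and card not in three:
--             three.append(card)
--     if len(three) == 0:
--         return False
--     three.sort()
--     # 判断三张相连的牌
--     three_connect = []
--     for i in range(0, len(three) - 1):
--         if three[i] + 1 == three[i + 1]: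
--             if three[i] not in three_connect:
--                 three_connect.append(three[i])
--             if three[i + 1] not in three_connect:
--                 three_connect.append(three[i + 1])
--     # 如果相连的三连对小于2不能构成飞机
--     if len(three_connect) < 2:
--         return False
--     for i in three_connect:
--         if i >= 15:
--             return False
--     # 记录三连对的组合长度
--     three_connect_length = len(three_connect)
--     # 移除所有三张
--     for card in three_connect:
--         new_cards.remove(card)
--         new_cards.remove(card)
--         new_cards.remove(card)
--
--     if len(new_cards) != three_connect_length:
--         return False
--     return True
-- ===== SOURCE B (Python) =====
-- def is_f_single(cards):
--     # Sort-then-scan: one linear pass over the sorted deck with a run-length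
--     # accumulator finds the triple values, replacing A's repeated count scans;
--     # connectivity is read off neighbouring entries of the (sorted, distinct)
--     # triples list, and the remove/recount pass becomes n == 4 * len(connected).
--     n = len(cards)
--     if n < 8 or n % 4 != 0:
--         return False
--     triples = []
--     prev, runlen = None, 0
--     for x in sorted(cards):
--         if x == prev:
--             runlen += 1
--         else:
--             prev, runlen = x, 1
--         if runlen == 3:
--             triples.append(x)
--     connected = [v for k, v in enumerate(triples)
--                  if (k > 0 and triples[k - 1] + 1 == v)
--                  or (k + 1 < len(triples) and v + 1 == triples[k + 1])]
--     if len(connected) < 2 or connected[-1] >= 15: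
--         return False
--     return n == 4 * len(connected)
-- ===== Notes on version B (the rewrite author's own statement) =====
-- stated objective: alternative
-- what changed: B sorts the deck once and finds triple values in a single run-length scan over the sorted list (no occurrence counting, no membership structure), reads connectivity off adjacent entries of the resulting sorted distinct triples list by index, and replaces A's copy/remove/recount pass with the arithmetic check n == 4 * len(connected).
import Mathlib
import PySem

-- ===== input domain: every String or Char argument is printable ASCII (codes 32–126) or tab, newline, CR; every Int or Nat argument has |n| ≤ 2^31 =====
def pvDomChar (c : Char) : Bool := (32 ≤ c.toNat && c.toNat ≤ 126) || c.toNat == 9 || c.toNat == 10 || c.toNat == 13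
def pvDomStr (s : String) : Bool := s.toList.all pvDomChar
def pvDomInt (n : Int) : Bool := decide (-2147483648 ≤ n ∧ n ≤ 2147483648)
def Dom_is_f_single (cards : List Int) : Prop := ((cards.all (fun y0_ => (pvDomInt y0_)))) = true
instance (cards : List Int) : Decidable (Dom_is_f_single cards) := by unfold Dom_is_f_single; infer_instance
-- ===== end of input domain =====

-- B sorts once and finds triples with a run-length scan instead of A's repeated count
-- scans, reads connectivity off adjacent entries of the sorted triples list, and replaces
-- the copy/remove/recount pass by n == 4*len(connected); this file proves A = B everywhere.


-- ===== PORT A =====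
-- literal transliteration of A; the pyGetD/getD-after-remove? defaults are never taken
-- (indices proved in range, removed values proved present).
def is_f_single (cards : List Int) : Bool :=
  if cards.length < 8 then false
  else if cards.length % 4 ≠ 0 then false
  else
    let new_cards := cards
    let three := new_cards.foldl (fun acc card =>
      if 3 ≤ new_cards.count card ∧ card ∉ acc then acc ++ [card] else acc) ([] : List Int)
    if three.length = 0 then false
    else
      let threeS := PySem.List.sorted three (fun x => x) false
      let tc := (PySem.List.pyRange 0 ((threeS.length : Int) - 1) 1).foldl (fun acc i =>
        if PySem.List.pyGetD threeS i 0 + 1 = PySem.List.pyGetD threeS (i + 1) 0 then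
          let acc1 := if PySem.List.pyGetD threeS i 0 ∉ acc then acc ++ [PySem.List.pyGetD threeS i 0] else acc
          if PySem.List.pyGetD threeS (i + 1) 0 ∉ acc1 then acc1 ++ [PySem.List.pyGetD threeS (i + 1) 0] else acc1
        else acc) ([] : List Int)
      if tc.length < 2 then false
      else if tc.any (fun i => 15 ≤ i) then false
      else
        let three_connect_length := tc.length
        let final := tc.foldl (fun nc card =>
          let nc1 := (PySem.List.remove? nc card).getD nc
          let nc2 := (PySem.List.remove? nc1 card).getD nc1
          (PySem.List.remove? nc2 card).getD nc2) new_cards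
        if final.length ≠ three_connect_length then false
        else true

-- ===== PORT B =====
-- loop body of B's single run-length pass over the sorted deck:
-- if x == prev: runlen += 1 else: prev, runlen = x, 1; if runlen == 3: triples.append(x)
def pvStepB (st : List Int × Option Int × Nat) (x : Int) : List Int × Option Int × Nat :=
  let runlen' := if some x = st.2.1 then st.2.2 + 1 else 1
  (if runlen' = 3 then st.1 ++ [x] else st.1, some x, runlen')

def is_f_single_alt (cards : List Int) : Bool :=
  let n := cards.length
  if n < 8 ∨ n % 4 ≠ 0 then false
  else
    let triples := ((PySem.List.sorted cards (fun x => x) false).foldl pvStepB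
      (([] : List Int), (none : Option Int), (0 : Nat))).1
    let connected : List Int := ((PySem.List.enumerate triples 0).filter (fun kv =>
        decide ((0 < kv.1 ∧ PySem.List.pyGetD triples (kv.1 - 1) 0 + 1 = kv.2) ∨
          (kv.1 + 1 < PySem.List.len triples ∧ kv.2 + 1 = PySem.List.pyGetD triples (kv.1 + 1) 0)))).map (·.2)
    if connected.length < 2 ∨ 15 ≤ PySem.List.pyGetD connected (-1) 0 then false
    else decide (n = 4 * connected.length)

-- ===== PRECONDITION & SPEC =====
def Spec_is_f_single (cards : List Int) (out : Bool) : Prop := out = is_f_single_alt cards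
instance (cards : List Int) (out : Bool) : Decidable (Spec_is_f_single cards out) := by unfold Spec_is_f_single; infer_instance

-- ===== CLAIM (what is proved, stated in full; the proofs are below) =====
def Claim_equal_is_f_single : Prop := ∀ (cards : List Int), Dom_is_f_single cards → Spec_is_f_single cards (is_f_single cards)

-- ===== LEMMAS AND PROOFS =====

-- A's triple-scan: result is nodup and holds exactly the values with count ≥ 3.
lemma pv_scan_spec (cards : List Int) :
    ∀ (l acc : List Int), acc.Nodup →
      (l.foldl (fun acc card => if 3 ≤ cards.count card ∧ card ∉ acc then acc ++ [card] else acc) acc).Nodup ∧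
      ∀ x, x ∈ l.foldl (fun acc card => if 3 ≤ cards.count card ∧ card ∉ acc then acc ++ [card] else acc) acc ↔
        x ∈ acc ∨ (3 ≤ cards.count x ∧ x ∈ l) := by
  intro l
  induction l with
  | nil => intro acc h; simpa using h
  | cons c l ih =>
    intro acc h
    simp only [List.foldl_cons]
    by_cases hc : 3 ≤ cards.count c ∧ c ∉ acc
    · rw [if_pos hc]
      obtain ⟨r1, r2⟩ := ih (acc ++ [c]) (by simp [List.nodup_append, h]; rintro a ha rfl; exact hc.2 ha)
      refine ⟨r1, fun x => ?_⟩
      rw [r2 x]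
      constructor
      · rintro (h' | ⟨hq, hm⟩)
        · rcases List.mem_append.mp h' with h'' | h''
          · tauto
          · have hxc : x = c := by simpa using h''
            subst hxc; exact Or.inr ⟨hc.1, List.mem_cons_self⟩
        · exact Or.inr ⟨hq, List.mem_cons_of_mem _ hm⟩
      · rintro (h' | ⟨hq, hm⟩)
        · exact Or.inl (List.mem_append.mpr (Or.inl h'))
        · rcases List.mem_cons.mp hm with rfl | hm'
          · exact Or.inl (List.mem_append.mpr (Or.inr (by simp)))
          · exact Or.inr ⟨hq, hm'⟩
    · rw [if_neg hc]
      obtain ⟨r1, r2⟩ := ih acc h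
      refine ⟨r1, fun x => ?_⟩
      rw [r2 x]
      simp only [List.mem_cons]
      constructor
      · tauto
      · rintro (h' | ⟨hq, rfl | hm⟩)
        · tauto
        · left; by_contra hx; exact hc ⟨hq, hx⟩
        · tauto

-- one guarded append 'if v not in acc: acc.append(v)'
lemma pv_add1 (a : Int) (acc : List Int) (h : acc.Nodup) :
    (if a ∉ acc then acc ++ [a] else acc).Nodup ∧
    ∀ x, x ∈ (if a ∉ acc then acc ++ [a] else acc) ↔ x ∈ acc ∨ x = a := by
  by_cases hin : a ∉ acc
  · rw [if_pos hin]
    refine ⟨?_, fun x => by simp⟩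
    simp [List.nodup_append, h]
    rintro x hx rfl; exact hin hx
  · rw [if_neg hin]
    have hin' : a ∈ acc := not_not.mp hin
    refine ⟨h, fun x => ?_⟩
    constructor
    · tauto
    · rintro (h' | rfl) <;> [exact h'; exact hin']

-- one iteration of A's adjacent-pair loop body
lemma pv_step (a b : Int) (R : List Int) (hnd : R.Nodup) :
    (if a + 1 = b then
        if b ∉ (if a ∉ R then R ++ [a] else R) then (if a ∉ R then R ++ [a] else R) ++ [b]
        else (if a ∉ R then R ++ [a] else R)
      else R).Nodup ∧
    ∀ x, x ∈ (if a + 1 = b then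
        if b ∉ (if a ∉ R then R ++ [a] else R) then (if a ∉ R then R ++ [a] else R) ++ [b]
        else (if a ∉ R then R ++ [a] else R)
      else R) ↔ x ∈ R ∨ (a + 1 = b ∧ (x = a ∨ x = b)) := by
  by_cases hab : a + 1 = b
  · rw [if_pos hab]
    obtain ⟨n1, m1⟩ := pv_add1 a R hnd
    obtain ⟨n2, m2⟩ := pv_add1 b _ n1
    refine ⟨n2, fun x => ?_⟩
    rw [m2 x, m1 x]
    constructor
    · rintro ((h' | rfl) | rfl) <;> tauto
    · rintro (h' | ⟨_, rfl | rfl⟩) <;> tauto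
  · rw [if_neg hab]
    refine ⟨hnd, fun x => ?_⟩
    constructor
    · tauto
    · rintro (h' | ⟨hc, _⟩) <;> [exact h'; exact absurd hc hab]

-- A's connected-triples loop over adjacent index pairs, characterised by membership.
lemma pv_tc_spec (S : List Int) :
    ∀ (m : Nat),
      ((List.range m).foldl (fun acc j =>
        if S.getD j 0 + 1 = S.getD (j + 1) 0 then
          if S.getD (j + 1) 0 ∉ (if S.getD j 0 ∉ acc then acc ++ [S.getD j 0] else acc) then
            (if S.getD j 0 ∉ acc then acc ++ [S.getD j 0] else acc) ++ [S.getD (j + 1) 0]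
          else if S.getD j 0 ∉ acc then acc ++ [S.getD j 0] else acc
        else acc) []).Nodup ∧
      ∀ x, x ∈ (List.range m).foldl (fun acc j =>
        if S.getD j 0 + 1 = S.getD (j + 1) 0 then
          if S.getD (j + 1) 0 ∉ (if S.getD j 0 ∉ acc then acc ++ [S.getD j 0] else acc) then
            (if S.getD j 0 ∉ acc then acc ++ [S.getD j 0] else acc) ++ [S.getD (j + 1) 0]
          else if S.getD j 0 ∉ acc then acc ++ [S.getD j 0] else acc
        else acc) [] ↔
        ∃ j, j < m ∧ S.getD j 0 + 1 = S.getD (j + 1) 0 ∧ (x = S.getD j 0 ∨ x = S.getD (j + 1) 0) := by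
  intro m
  induction m with
  | zero => simp
  | succ m ih =>
    obtain ⟨r1, r2⟩ := ih
    rw [List.range_succ]
    simp only [List.foldl_append, List.foldl_cons, List.foldl_nil]
    obtain ⟨s1, s2⟩ := pv_step (S.getD m 0) (S.getD (m + 1) 0) _ r1
    refine ⟨s1, fun x => ?_⟩
    rw [s2 x, r2 x]
    constructor
    · rintro (⟨j, hj, h1, h2⟩ | ⟨hadj, h2⟩)
      · exact ⟨j, by omega, h1, h2⟩
      · exact ⟨m, by omega, hadj, h2⟩
    · rintro ⟨j, hj, h1, h2⟩
      rcases Nat.lt_or_ge j m with hjm | hjm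
      · exact Or.inl ⟨j, hjm, h1, h2⟩
      · have hje : j = m := by omega
        subst hje
        exact Or.inr ⟨h1, h2⟩

-- in a strictly increasing integer list, a value is collected by the adjacent-pair loop
-- iff a neighbouring value (±1) is also in the list.
lemma pv_adj_iff (S : List Int) (hS : S.Pairwise (· < ·)) (x : Int) :
    (∃ j, j < S.length - 1 ∧ S.getD j 0 + 1 = S.getD (j + 1) 0 ∧ (x = S.getD j 0 ∨ x = S.getD (j + 1) 0)) ↔
      (x ∈ S ∧ ((x - 1) ∈ S ∨ (x + 1) ∈ S)) := by
  have hmono : ∀ (i j : Nat) (hi : i < S.length) (hj : j < S.length), i < j → S[i] < S[j] :=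
    List.pairwise_iff_getElem.mp hS
  constructor
  · rintro ⟨j, hj, h1, h2⟩
    have hj1 : j + 1 < S.length := by omega
    have hj0 : j < S.length := by omega
    rw [List.getD_eq_getElem S 0 hj0, List.getD_eq_getElem S 0 hj1] at h1 h2
    rcases h2 with rfl | rfl
    · exact ⟨List.getElem_mem hj0, Or.inr (by rw [h1]; exact List.getElem_mem hj1)⟩
    · refine ⟨List.getElem_mem hj1, Or.inl ?_⟩
      have he : S[j + 1] - 1 = S[j] := by omega
      rw [he]; exact List.getElem_mem hj0
  · rintro ⟨hx, hnb | hnb⟩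
    · obtain ⟨k, hkl, hk⟩ := List.mem_iff_getElem.mp hnb
      obtain ⟨j, hjl, hj⟩ := List.mem_iff_getElem.mp hx
      have hkj : k < j := by
        rcases Nat.lt_trichotomy k j with h | h | h
        · exact h
        · subst h; omega
        · have := hmono j k hjl hkl h; omega
      have hkj1 : j = k + 1 := by
        by_contra hne
        have hlt : k + 1 < j := by omega
        have h1 := hmono k (k + 1) hkl (by omega) (by omega)
        have h2 := hmono (k + 1) j (by omega) hjl hlt
        omega
      subst hkj1
      refine ⟨k, by omega, ?_, Or.inr ?_⟩
      · rw [List.getD_eq_getElem S 0 hkl, List.getD_eq_getElem S 0 hjl]; omega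
      · rw [List.getD_eq_getElem S 0 hjl]; omega
    · obtain ⟨j, hjl, hj⟩ := List.mem_iff_getElem.mp hx
      obtain ⟨k, hkl, hk⟩ := List.mem_iff_getElem.mp hnb
      have hjk : j < k := by
        rcases Nat.lt_trichotomy j k with h | h | h
        · exact h
        · subst h; omega
        · have := hmono k j hkl hjl h; omega
      have : k = j + 1 := by
        by_contra hne
        have hlt : j + 1 < k := by omega
        have h1 := hmono j (j + 1) hjl (by omega) (by omega)
        have h2 := hmono (j + 1) k (by omega) hkl hlt
        omega
      subst this
      refine ⟨j, by omega, ?_, Or.inl ?_⟩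
      · rw [List.getD_eq_getElem S 0 hjl, List.getD_eq_getElem S 0 hkl]; omega
      · rw [List.getD_eq_getElem S 0 hjl]; omega

-- removing three copies of each of L distinct values (all present ≥ 3 times) shortens by 3·L.
lemma pv_removal :
    ∀ (tc m : List Int), tc.Nodup → (∀ v ∈ tc, 3 ≤ m.count v) →
      (tc.foldl (fun nc card =>
        (PySem.List.remove? ((PySem.List.remove? ((PySem.List.remove? nc card).getD nc) card).getD
            ((PySem.List.remove? nc card).getD nc)) card).getD
          ((PySem.List.remove? ((PySem.List.remove? nc card).getD nc) card).getD
            ((PySem.List.remove? nc card).getD nc))) m).length + 3 * tc.length = m.length := by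
  intro tc
  induction tc with
  | nil => intro m _ _; simp
  | cons v tc ih =>
    intro m hnd hcnt
    have hc : 3 ≤ m.count v := hcnt v List.mem_cons_self
    have hm1 : v ∈ m := List.count_pos_iff.mp (by omega)
    have e1 : PySem.List.remove? m v = some (m.erase v) := PySem.List.remove?_eq_some_erase m v hm1
    have hc2 : (m.erase v).count v = m.count v - 1 := List.count_erase_self
    have hm2 : v ∈ m.erase v := List.count_pos_iff.mp (by omega)
    have e2 : PySem.List.remove? (m.erase v) v = some ((m.erase v).erase v) :=
      PySem.List.remove?_eq_some_erase _ v hm2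
    have hc3 : ((m.erase v).erase v).count v = (m.erase v).count v - 1 := List.count_erase_self
    have hm3 : v ∈ (m.erase v).erase v := List.count_pos_iff.mp (by omega)
    have e3 : PySem.List.remove? ((m.erase v).erase v) v = some (((m.erase v).erase v).erase v) :=
      PySem.List.remove?_eq_some_erase _ v hm3
    simp only [List.foldl_cons, e1, Option.getD_some, e2, e3]
    have hrest : ∀ w ∈ tc, 3 ≤ (((m.erase v).erase v).erase v).count w := by
      intro w hw
      have hne : v ≠ w := by rintro rfl; exact (List.nodup_cons.mp hnd).1 hw
      rw [List.count_erase_of_ne hne.symm, List.count_erase_of_ne hne.symm, List.count_erase_of_ne hne.symm]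
      exact hcnt w (List.mem_cons_of_mem _ hw)
    have hih := ih (((m.erase v).erase v).erase v) (List.nodup_cons.mp hnd).2 hrest
    have l1 : (m.erase v).length = m.length - 1 := List.length_erase_of_mem hm1
    have l2 : ((m.erase v).erase v).length = (m.erase v).length - 1 := List.length_erase_of_mem hm2
    have l3 : (((m.erase v).erase v).erase v).length = ((m.erase v).erase v).length - 1 := List.length_erase_of_mem hm3
    have hlen : 1 ≤ m.length := List.length_pos_of_mem hm1
    have hlen2 : 1 ≤ (m.erase v).length := List.length_pos_of_mem hm2
    have hlen3 : 1 ≤ ((m.erase v).erase v).length := List.length_pos_of_mem hm3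
    simp only [List.length_cons]
    omega

-- B's run-length scan, loop invariant: from state (acc, some v, j) over a sorted suffix
-- whose elements all dominate v, the pass appends exactly the values reaching count 3.
lemma pv_rl_inv :
    ∀ (s : List Int), s.Pairwise (· ≤ ·) → ∀ (acc : List Int) (v : Int) (j : Nat), 1 ≤ j →
      (∀ y ∈ s, v ≤ y) →
      ∃ r, (s.foldl pvStepB (acc, some v, j)).1 = acc ++ r ∧ r.Pairwise (· < ·) ∧
        (∀ x ∈ r, v ≤ x) ∧
        (∀ x, x ∈ r ↔ (x = v ∧ j < 3 ∧ 3 ≤ j + s.count v) ∨ (x ≠ v ∧ 3 ≤ s.count x ∧ x ∈ s)) := by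
  intro s
  induction s with
  | nil =>
    intro _ acc v j hj _
    refine ⟨[], by simp, by simp, by simp, fun x => ?_⟩
    simp only [List.not_mem_nil, List.count_nil, false_iff]
    rintro (⟨_, h1, h2⟩ | ⟨_, _, h⟩)
    · omega
    · exact h
  | cons x t ih =>
    intro hpw acc v j hj hv
    have hxt : ∀ y ∈ t, x ≤ y := fun y hy => (List.pairwise_cons.mp hpw).1 y hy
    have hpt : t.Pairwise (· ≤ ·) := (List.pairwise_cons.mp hpw).2
    have hvx : v ≤ x := hv x List.mem_cons_self
    simp only [List.foldl_cons]
    by_cases hxv : x = v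
    · subst hxv
      have hstep : pvStepB (acc, some x, j) x =
          (if j + 1 = 3 then acc ++ [x] else acc, some x, j + 1) := by
        simp [pvStepB]
      rw [hstep]
      obtain ⟨r, hr1, hr2, hr3, hr4⟩ := ih hpt (if j + 1 = 3 then acc ++ [x] else acc) x (j + 1)
        (by omega) (fun y hy => hv y (List.mem_cons_of_mem _ hy))
      refine ⟨(if j + 1 = 3 then [x] else []) ++ r, ?_, ?_, ?_, fun z => ?_⟩
      · rw [hr1]; by_cases h3 : j + 1 = 3 <;> simp [h3]
      · by_cases h3 : j + 1 = 3
        · simp only [if_pos h3, List.singleton_append, List.pairwise_cons]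
          refine ⟨fun y hy => ?_, hr2⟩
          have hyx := hr3 y hy
          have : y ≠ x := by
            intro he; subst he
            rcases (hr4 y).mp hy with ⟨_, hlt, _⟩ | ⟨hne, _, _⟩
            · omega
            · exact hne rfl
          omega
        · simpa [h3] using hr2
      · intro z hz
        rcases List.mem_append.mp hz with hz | hz
        · by_cases h3 : j + 1 = 3
          · simp only [if_pos h3, List.mem_singleton] at hz; omega
          · simp [h3] at hz
        · exact hr3 z hz
      · have hcnt : (x :: t).count x = t.count x + 1 := by simp
        constructor
        · intro hz
          rcases List.mem_append.mp hz with hz | hz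
          · by_cases h3 : j + 1 = 3
            · simp only [if_pos h3, List.mem_singleton] at hz
              subst hz
              exact Or.inl ⟨rfl, by omega, by rw [hcnt]; omega⟩
            · simp [h3] at hz
          · rcases (hr4 z).mp hz with ⟨rfl, h1, h2⟩ | ⟨h1, h2, h3⟩
            · exact Or.inl ⟨rfl, by omega, by rw [hcnt]; omega⟩
            · refine Or.inr ⟨h1, ?_, List.mem_cons_of_mem _ h3⟩
              rwa [List.count_cons_of_ne (Ne.symm h1)]
        · rintro (⟨rfl, h1, h2⟩ | ⟨h1, h2, h3⟩)
          · rw [hcnt] at h2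
            by_cases h3 : j + 1 = 3
            · exact List.mem_append.mpr (Or.inl (by simp [h3]))
            · refine List.mem_append.mpr (Or.inr ((hr4 z).mpr (Or.inl ⟨rfl, by omega, by omega⟩)))
          · rcases List.mem_cons.mp h3 with rfl | h3'
            · exact absurd rfl h1
            · refine List.mem_append.mpr (Or.inr ((hr4 z).mpr (Or.inr ⟨h1, ?_, h3'⟩)))
              rwa [List.count_cons_of_ne (Ne.symm h1)] at h2
    · have hvlt : v < x := lt_of_le_of_ne hvx (Ne.symm hxv)
      have hstep : pvStepB (acc, some v, j) x = (acc, some x, 1) := by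
        simp [pvStepB, hxv]
      rw [hstep]
      obtain ⟨r, hr1, hr2, hr3, hr4⟩ := ih hpt acc x 1 le_rfl hxt
      have hvnot : v ∉ x :: t := by
        intro hm
        rcases List.mem_cons.mp hm with he | hm'
        · exact hxv he.symm
        · exact absurd (hxt v hm') (by omega)
      have hcv : (x :: t).count v = 0 := List.count_eq_zero.mpr hvnot
      refine ⟨r, hr1, hr2, fun z hz => le_trans hvx (hr3 z hz), fun z => ?_⟩
      rw [hr4 z]
      constructor
      · rintro (⟨rfl, _, h2⟩ | ⟨h1, h2, h3⟩)
        · refine Or.inr ⟨by omega, by rw [List.count_cons_self]; omega, List.mem_cons_self⟩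
        · have hzt : x ≤ z := hxt z h3
          refine Or.inr ⟨by omega, by rwa [List.count_cons_of_ne (Ne.symm h1)], List.mem_cons_of_mem _ h3⟩
      · rintro (⟨rfl, h1, h2⟩ | ⟨h1, h2, h3⟩)
        · rw [hcv] at h2; omega
        · by_cases hzx : z = x
          · subst hzx
            exact Or.inl ⟨rfl, by omega, by rw [List.count_cons_self] at h2; omega⟩
          · have h3' : z ∈ t := by
              rcases List.mem_cons.mp h3 with he | h3'
              · exact absurd he hzx
              · exact h3'
            exact Or.inr ⟨hzx, by rwa [List.count_cons_of_ne (Ne.symm hzx)] at h2, h3'⟩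

-- B's run-length scan from the initial state: exactly the values of count ≥ 3, strictly sorted.
lemma pv_rl_spec (s : List Int) (hs : s.Pairwise (· ≤ ·)) :
    ∃ r, (s.foldl pvStepB (([] : List Int), (none : Option Int), (0 : Nat))).1 = r ∧
      r.Pairwise (· < ·) ∧ ∀ x, x ∈ r ↔ 3 ≤ s.count x ∧ x ∈ s := by
  cases s with
  | nil => exact ⟨[], rfl, by simp, by simp⟩
  | cons x t =>
    have hxt : ∀ y ∈ t, x ≤ y := fun y hy => (List.pairwise_cons.mp hs).1 y hy
    have hpt : t.Pairwise (· ≤ ·) := (List.pairwise_cons.mp hs).2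
    have hstep : pvStepB (([] : List Int), (none : Option Int), (0 : Nat)) x =
        ([], some x, 1) := by simp [pvStepB]
    simp only [List.foldl_cons, hstep]
    obtain ⟨r, hr1, hr2, _, hr4⟩ := pv_rl_inv t hpt [] x 1 le_rfl hxt
    refine ⟨r, by simpa using hr1, hr2, fun z => ?_⟩
    rw [hr4 z]
    constructor
    · rintro (⟨rfl, _, h2⟩ | ⟨h1, h2, h3⟩)
      · exact ⟨by rw [List.count_cons_self]; omega, List.mem_cons_self⟩
      · exact ⟨by rwa [List.count_cons_of_ne (Ne.symm h1)], List.mem_cons_of_mem _ h3⟩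
    · rintro ⟨h2, h3⟩
      by_cases hzx : z = x
      · subst hzx
        exact Or.inl ⟨rfl, by omega, by rw [List.count_cons_self] at h2; omega⟩
      · rcases List.mem_cons.mp h3 with rfl | h3'
        · exact absurd rfl hzx
        · exact Or.inr ⟨hzx, by rwa [List.count_cons_of_ne (Ne.symm hzx)] at h2, h3'⟩

-- filtering an enumerate by an index condition = filtering the list by the matching value condition
lemma pv_enum_filter (p : Int × Int → Bool) (q : Int → Bool) :
    ∀ (T : List Int) (s : Int), (∀ (k : Nat) (hk : k < T.length), p ((s + (k : Int)), T[k]) = q T[k]) →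
      ((PySem.List.enumerate T s).filter p).map (·.2) = T.filter q := by
  intro T
  induction T with
  | nil => intro s _; simp [PySem.List.enumerate_nil]
  | cons x xs ih =>
    intro s h
    rw [PySem.List.enumerate_cons]
    have h0 : p (s, x) = q x := by
      have := h 0 (by simp)
      simpa using this
    have hrec := ih (s + 1) (fun k hk => by
      have := h (k + 1) (by simpa using Nat.succ_lt_succ hk)
      have harg : s + ((k + 1 : Nat) : Int) = s + 1 + (k : Int) := by push_cast; ring
      rw [harg] at this
      simpa using this)
    by_cases hq : q x = true
    · rw [List.filter_cons, List.filter_cons, if_pos (h0 ▸ hq), if_pos hq]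
      simp [hrec]
    · rw [List.filter_cons, List.filter_cons]
      have : p (s, x) = false := by rw [h0]; exact eq_false_of_ne_true hq
      rw [if_neg (by simp [this]), if_neg (by simp [hq])]
      exact hrec

-- in a strictly increasing list, the index-neighbour test ↔ the ±1 membership test
lemma pv_idx_adj (T : List Int) (hT : T.Pairwise (· < ·)) (k : Nat) (hk : k < T.length) :
    ((0 < (k : Int) ∧ PySem.List.pyGetD T ((k : Int) - 1) 0 + 1 = T[k]) ∨
      ((k : Int) + 1 < PySem.List.len T ∧ T[k] + 1 = PySem.List.pyGetD T ((k : Int) + 1) 0)) ↔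
      ((T[k] - 1) ∈ T ∨ (T[k] + 1) ∈ T) := by
  have hmono : ∀ (i j : Nat) (hi : i < T.length) (hj : j < T.length), i < j → T[i] < T[j] :=
    List.pairwise_iff_getElem.mp hT
  constructor
  · rintro (⟨h0, h1⟩ | ⟨h0, h1⟩)
    · have hkpos : 0 < k := by exact_mod_cast h0
      have hcast : (k : Int) - 1 = ((k - 1 : Nat) : Int) := by omega
      rw [hcast, PySem.List.pyGetD_natCast, List.getD_eq_getElem T 0 (by omega)] at h1
      refine Or.inl ?_
      have : T[k] - 1 = T[k - 1] := by omega
      rw [this]; exact List.getElem_mem (by omega)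
    · rw [PySem.List.len_eq] at h0
      have hk1 : k + 1 < T.length := by exact_mod_cast h0
      have hcast : (k : Int) + 1 = ((k + 1 : Nat) : Int) := by push_cast; ring
      rw [hcast, PySem.List.pyGetD_natCast, List.getD_eq_getElem T 0 hk1] at h1
      exact Or.inr (h1 ▸ List.getElem_mem hk1)
  · rintro (hm | hm)
    · obtain ⟨j, hjl, hj⟩ := List.mem_iff_getElem.mp hm
      have hjk : j < k := by
        rcases Nat.lt_trichotomy j k with h | h | h
        · exact h
        · subst h; omega
        · have := hmono k j hk hjl h; omega
      have hje : j = k - 1 := by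
        by_contra hne
        have hlt : j + 1 < k := by omega
        have h1 := hmono j (j + 1) hjl (by omega) (by omega)
        have h2 := hmono (j + 1) k (by omega) hk hlt
        omega
      refine Or.inl ⟨by exact_mod_cast Nat.pos_of_ne_zero (by omega), ?_⟩
      have hcast : (k : Int) - 1 = ((k - 1 : Nat) : Int) := by omega
      rw [hcast, PySem.List.pyGetD_natCast, List.getD_eq_getElem T 0 (by omega)]
      subst hje
      omega
    · obtain ⟨j, hjl, hj⟩ := List.mem_iff_getElem.mp hm
      have hjk : k < j := by
        rcases Nat.lt_trichotomy k j with h | h | h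
        · exact h
        · subst h; omega
        · have := hmono j k hjl hk h; omega
      have hje : j = k + 1 := by
        by_contra hne
        have hlt : k + 1 < j := by omega
        have h1 := hmono k (k + 1) hk (by omega) (by omega)
        have h2 := hmono (k + 1) j (by omega) hjl hlt
        omega
      subst hje
      refine Or.inr ⟨by rw [PySem.List.len_eq]; exact_mod_cast hjl, ?_⟩
      have hcast : (k : Int) + 1 = ((k + 1 : Nat) : Int) := by push_cast; ring
      rw [hcast, PySem.List.pyGetD_natCast, List.getD_eq_getElem T 0 hjl]
      omega

-- every element of a (≤)-sorted list is at most its last element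
lemma pv_le_getLast :
    ∀ (l : List Int) (h : l ≠ []), l.Pairwise (· ≤ ·) → ∀ x ∈ l, x ≤ l.getLast h := by
  intro l
  induction l with
  | nil => intro h; exact absurd rfl h
  | cons a t ih =>
    intro _ hp x hx
    cases t with
    | nil => simp at hx; simp [hx]
    | cons b u =>
      rw [List.getLast_cons (by simp)]
      rcases List.mem_cons.mp hx with rfl | hx'
      · have hlast : (b :: u).getLast (by simp) ∈ b :: u := List.getLast_mem _
        exact le_trans ((List.pairwise_cons.mp hp).1 _ hlast) le_rfl
      · exact ih (by simp) (List.pairwise_cons.mp hp).2 x hx'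

-- ===== VERDICT (by name: the statement is the Claim_ definition above) =====
theorem is_f_single_spec : Claim_equal_is_f_single := by
  intro cards _
  unfold Spec_is_f_single is_f_single is_f_single_alt
  simp only []
  by_cases h8 : cards.length < 8
  · rw [if_pos h8, if_pos (Or.inl h8)]
  rw [if_neg h8]
  by_cases h4 : cards.length % 4 ≠ 0
  · rw [if_pos h4, if_pos (Or.inr h4)]
  rw [if_neg h4, if_neg (show ¬(cards.length < 8 ∨ cards.length % 4 ≠ 0) by tauto)]
  -- A's triple scan characterisation
  obtain ⟨hA_nd, hA_mem⟩ := pv_scan_spec cards cards [] List.nodup_nil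
  -- S := sorted(three), A's sorted triples list
  have hS_nd : (PySem.List.sorted (cards.foldl (fun acc card => if 3 ≤ cards.count card ∧ card ∉ acc then acc ++ [card] else acc) []) (fun x => x) false).Nodup :=
    (List.Perm.nodup_iff (PySem.List.sorted_perm _ (fun x => x) false)).mpr hA_nd
  have hS_pw : (PySem.List.sorted (cards.foldl (fun acc card => if 3 ≤ cards.count card ∧ card ∉ acc then acc ++ [card] else acc) []) (fun x => x) false).Pairwise (· < ·) :=
    ((PySem.List.sorted_pairwise _ (fun x => x)).and hS_nd).imp (fun h => lt_of_le_of_ne h.1 h.2)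
  have hS_mem : ∀ x, x ∈ PySem.List.sorted (cards.foldl (fun acc card => if 3 ≤ cards.count card ∧ card ∉ acc then acc ++ [card] else acc) []) (fun x => x) false ↔
      3 ≤ cards.count x ∧ x ∈ cards := by
    intro x
    rw [PySem.List.mem_sorted, hA_mem x]
    simp
  set S := PySem.List.sorted (cards.foldl (fun acc card => if 3 ≤ cards.count card ∧ card ∉ acc then acc ++ [card] else acc) []) (fun x => x) false with hSdef
  -- B's run-length scan over the sorted deck produces exactly S
  obtain ⟨r, hrdef, hr_pw, hr_mem⟩ := pv_rl_spec (PySem.List.sorted cards (fun x => x) false)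
    (PySem.List.sorted_pairwise cards (fun x => x))
  have hr_mem' : ∀ x, x ∈ r ↔ 3 ≤ cards.count x ∧ x ∈ cards := by
    intro x
    rw [hr_mem x, PySem.List.mem_sorted,
      (PySem.List.sorted_perm cards (fun x => x) false).count_eq x]
  have hrS : r = S := by
    refine PySem.List.eq_of_perm_of_pairwise_le_of_injective (fun x : Int => x)
      (fun a b h => h) ?_ (hr_pw.imp le_of_lt) (hS_pw.imp le_of_lt)
    refine (List.perm_ext_iff_of_nodup (hr_pw.imp ne_of_lt) hS_nd).mpr (fun x => ?_)
    rw [hr_mem' x, hS_mem x]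
  rw [hrdef, hrS]
  -- B's connected list = the membership filter of S
  have hconn_eq : ((PySem.List.enumerate S 0).filter (fun kv =>
      decide ((0 < kv.1 ∧ PySem.List.pyGetD S (kv.1 - 1) 0 + 1 = kv.2) ∨
        (kv.1 + 1 < PySem.List.len S ∧ kv.2 + 1 = PySem.List.pyGetD S (kv.1 + 1) 0)))).map (·.2) =
      S.filter (fun v => decide ((v - 1) ∈ S ∨ (v + 1) ∈ S)) := by
    refine pv_enum_filter _ _ S 0 (fun k hk => ?_)
    simp only [zero_add]
    exact decide_eq_decide.mpr (pv_idx_adj S hS_pw k hk)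
  rw [hconn_eq]
  have hconn_mem : ∀ x, x ∈ S.filter (fun v => decide ((v - 1) ∈ S ∨ (v + 1) ∈ S)) ↔
      x ∈ S ∧ ((x - 1) ∈ S ∨ (x + 1) ∈ S) := by
    intro x; simp [List.mem_filter]
  have hconn_nd : (S.filter (fun v => decide ((v - 1) ∈ S ∨ (v + 1) ∈ S))).Nodup :=
    hS_nd.filter _
  have hconn_pw : (S.filter (fun v => decide ((v - 1) ∈ S ∨ (v + 1) ∈ S))).Pairwise (· < ·) :=
    hS_pw.filter _
  -- A's "no triples" guard: then S = [] so B's connected list is empty too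
  by_cases h0 : (cards.foldl (fun acc card => if 3 ≤ cards.count card ∧ card ∉ acc then acc ++ [card] else acc) []).length = 0
  · rw [if_pos h0]
    have hSnil : S = [] := by
      rw [hSdef, PySem.List.sorted_eq_nil_iff]
      exact List.length_eq_zero_iff.mp h0
    rw [hSnil]
    simp
  rw [if_neg h0]
  -- A's adjacent-pair loop over indices of S
  have hn1 : 1 ≤ S.length := by
    rw [hSdef, PySem.List.length_sorted]; omega
  have hr : PySem.List.pyRange 0 ((S.length : Int) - 1) 1 = List.map (fun k : Nat => (k : Int)) (List.range (S.length - 1)) := by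
    rw [show ((S.length : Int) - 1) = ((S.length - 1 : Nat) : Int) by omega, PySem.List.pyRange_zero_natCast]
  rw [hr]
  simp only [List.foldl_map, ← Nat.cast_add_one, PySem.List.pyGetD_natCast]
  obtain ⟨htc_nd, htc_mem⟩ := pv_tc_spec S (S.length - 1)
  have htc_mem' : ∀ x, x ∈ (List.range (S.length - 1)).foldl (fun acc j =>
        if S.getD j 0 + 1 = S.getD (j + 1) 0 then
          if S.getD (j + 1) 0 ∉ (if S.getD j 0 ∉ acc then acc ++ [S.getD j 0] else acc) then
            (if S.getD j 0 ∉ acc then acc ++ [S.getD j 0] else acc) ++ [S.getD (j + 1) 0]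
          else if S.getD j 0 ∉ acc then acc ++ [S.getD j 0] else acc
        else acc) [] ↔ x ∈ S ∧ ((x - 1) ∈ S ∨ (x + 1) ∈ S) :=
    fun x => (htc_mem x).trans (pv_adj_iff S hS_pw x)
  -- A's tc and B's connected list are permutations of each other
  have hperm2 : ((List.range (S.length - 1)).foldl (fun acc j =>
        if S.getD j 0 + 1 = S.getD (j + 1) 0 then
          if S.getD (j + 1) 0 ∉ (if S.getD j 0 ∉ acc then acc ++ [S.getD j 0] else acc) then
            (if S.getD j 0 ∉ acc then acc ++ [S.getD j 0] else acc) ++ [S.getD (j + 1) 0]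
          else if S.getD j 0 ∉ acc then acc ++ [S.getD j 0] else acc
        else acc) []).Perm (S.filter (fun v => decide ((v - 1) ∈ S ∨ (v + 1) ∈ S))) :=
    (List.perm_ext_iff_of_nodup htc_nd hconn_nd).mpr (fun x => (htc_mem' x).trans (hconn_mem x).symm)
  have hlen := hperm2.length_eq
  by_cases hlt : ((List.range (S.length - 1)).foldl (fun acc j =>
        if S.getD j 0 + 1 = S.getD (j + 1) 0 then
          if S.getD (j + 1) 0 ∉ (if S.getD j 0 ∉ acc then acc ++ [S.getD j 0] else acc) then
            (if S.getD j 0 ∉ acc then acc ++ [S.getD j 0] else acc) ++ [S.getD (j + 1) 0]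
          else if S.getD j 0 ∉ acc then acc ++ [S.getD j 0] else acc
        else acc) []).length < 2
  · rw [if_pos hlt, if_pos (Or.inl (hlen ▸ hlt))]
  rw [if_neg hlt]
  -- the ≥15 guard: any-test on tc ↔ last element of B's sorted connected list ≥ 15
  have hne : S.filter (fun v => decide ((v - 1) ∈ S ∨ (v + 1) ∈ S)) ≠ [] := by
    intro he
    exact hlt (by rw [hlen, he]; simp)
  have hlast : PySem.List.pyGetD (S.filter (fun v => decide ((v - 1) ∈ S ∨ (v + 1) ∈ S))) (-1) 0 =
      (S.filter (fun v => decide ((v - 1) ∈ S ∨ (v + 1) ∈ S))).getLast hne :=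
    PySem.List.pyGetD_neg_one _ _ hne
  have hany := hperm2.any_eq (f := fun i => decide (15 ≤ i))
  have hany_last : ((S.filter (fun v => decide ((v - 1) ∈ S ∨ (v + 1) ∈ S))).any (fun i => decide (15 ≤ i))) =
      decide (15 ≤ (S.filter (fun v => decide ((v - 1) ∈ S ∨ (v + 1) ∈ S))).getLast hne) := by
    by_cases hc : 15 ≤ (S.filter (fun v => decide ((v - 1) ∈ S ∨ (v + 1) ∈ S))).getLast hne
    · rw [decide_eq_true hc]
      exact List.any_eq_true.mpr ⟨_, List.getLast_mem hne, decide_eq_true hc⟩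
    · rw [decide_eq_false hc]
      refine List.any_eq_false.mpr (fun x hx => ?_)
      have := pv_le_getLast _ hne (hconn_pw.imp le_of_lt) x hx
      simp only [decide_eq_true_eq]
      omega
  by_cases h15 : ((List.range (S.length - 1)).foldl (fun acc j =>
        if S.getD j 0 + 1 = S.getD (j + 1) 0 then
          if S.getD (j + 1) 0 ∉ (if S.getD j 0 ∉ acc then acc ++ [S.getD j 0] else acc) then
            (if S.getD j 0 ∉ acc then acc ++ [S.getD j 0] else acc) ++ [S.getD (j + 1) 0]
          else if S.getD j 0 ∉ acc then acc ++ [S.getD j 0] else acc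
        else acc) []).any (fun i => decide (15 ≤ i)) = true
  · rw [if_pos h15]
    have : 15 ≤ PySem.List.pyGetD (S.filter (fun v => decide ((v - 1) ∈ S ∨ (v + 1) ∈ S))) (-1) 0 := by
      rw [hlast]
      have := hany ▸ h15
      rw [hany_last] at this
      exact of_decide_eq_true this
    rw [if_pos (Or.inr this)]
  rw [if_neg h15]
  rw [if_neg (show ¬((S.filter (fun v => decide ((v - 1) ∈ S ∨ (v + 1) ∈ S))).length < 2 ∨
      15 ≤ PySem.List.pyGetD (S.filter (fun v => decide ((v - 1) ∈ S ∨ (v + 1) ∈ S))) (-1) 0) by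
    rintro (h | h)
    · exact hlt (hlen ▸ h)
    · rw [hlast] at h
      rw [hany, hany_last] at h15
      exact h15 (decide_eq_true h))]
  -- final branch: the removal pass shortens cards by exactly 3·L, so A's check is n = 4·L
  have hcnt : ∀ v ∈ (List.range (S.length - 1)).foldl (fun acc j =>
        if S.getD j 0 + 1 = S.getD (j + 1) 0 then
          if S.getD (j + 1) 0 ∉ (if S.getD j 0 ∉ acc then acc ++ [S.getD j 0] else acc) then
            (if S.getD j 0 ∉ acc then acc ++ [S.getD j 0] else acc) ++ [S.getD (j + 1) 0]
          else if S.getD j 0 ∉ acc then acc ++ [S.getD j 0] else acc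
        else acc) [], 3 ≤ cards.count v :=
    fun v hv => ((hS_mem v).mp ((htc_mem' v).mp hv).1).1
  have hrem := pv_removal _ cards htc_nd hcnt
  by_cases hfin : (((List.range (S.length - 1)).foldl (fun acc j =>
        if S.getD j 0 + 1 = S.getD (j + 1) 0 then
          if S.getD (j + 1) 0 ∉ (if S.getD j 0 ∉ acc then acc ++ [S.getD j 0] else acc) then
            (if S.getD j 0 ∉ acc then acc ++ [S.getD j 0] else acc) ++ [S.getD (j + 1) 0]
          else if S.getD j 0 ∉ acc then acc ++ [S.getD j 0] else acc
        else acc) []).foldl (fun nc card =>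
        (PySem.List.remove? ((PySem.List.remove? ((PySem.List.remove? nc card).getD nc) card).getD
            ((PySem.List.remove? nc card).getD nc)) card).getD
          ((PySem.List.remove? ((PySem.List.remove? nc card).getD nc) card).getD
            ((PySem.List.remove? nc card).getD nc))) cards).length ≠
      ((List.range (S.length - 1)).foldl (fun acc j =>
        if S.getD j 0 + 1 = S.getD (j + 1) 0 then
          if S.getD (j + 1) 0 ∉ (if S.getD j 0 ∉ acc then acc ++ [S.getD j 0] else acc) then
            (if S.getD j 0 ∉ acc then acc ++ [S.getD j 0] else acc) ++ [S.getD (j + 1) 0]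
          else if S.getD j 0 ∉ acc then acc ++ [S.getD j 0] else acc
        else acc) []).length
  · rw [if_pos hfin]
    exact (decide_eq_false (by omega)).symm
  · rw [if_neg hfin]
    exact (decide_eq_true (by omega)).symm
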